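-- pv_equiv track=rewrite | github.com/HyunBin-Jang/Algorithm_Team5 | Minimizer-indexing/mapping_algor.py | minimizer_match
-- ===== SOURCE A (Python) =====
-- def minimizer_match(
--     reference,index,read,
--     k=20,w=8,
--     max_mismatch=2,seed_min=2
-- ):
--     read_kmers = [read[i:i + k] for i in range(len(read) - k + 1)]
--     read_min_pairs = []
--     for i in range(len(read_kmers) - w + 1):
--         window = read_kmers[i:i + w]
--         mn = min(window)
--         mn_idx = window.index(mn)
--         read_pos = i + mn_idx
--         read_min_pairs.append((mn, read_pos))
--
--     delta_counts = {}
--     for mn, rpos in read_min_pairs: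
--         if mn not in index:
--             continue
--         for refpos in index[mn]:
--             delta = refpos - rpos
--             delta_counts[delta] = delta_counts.get(delta, 0) + 1
--
--     candidates = [d for d, cnt in delta_counts.items() if cnt >= seed_min]
--     best_pos, best_mm = -1, max_mismatch + 1
--
--     for delta in candidates:
--         if delta < 0 or delta + len(read) > len(reference):
--             continue
--         window_seq = reference[delta : delta + len(read)]
--         mismatches = sum(1 for a, b in zip(read, window_seq) if a != b)
--         if mismatches <= max_mismatch and mismatches < best_mm:
--             best_mm = mismatches
--             best_pos = delta
--
--     return best_pos, best_mm
-- ===== SOURCE B (Python) =====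
-- def minimizer_match(
--     reference, index, read,
--     k=20, w=8,
--     max_mismatch=2, seed_min=2
-- ):
--     kmers = [read[i:i + k] for i in range(len(read) - k + 1)]
--
--     # sliding-window minimum with a monotonic queue (leftmost minimum on ties)
--     read_min_pairs = []
--     dq = []    # dq[head:] = live deque of indices; kmer values non-decreasing
--     head = 0   # advancing head pops the front of the live deque
--     for j in range(len(kmers)):
--         while len(dq) > head and kmers[dq[-1]] > kmers[j]:
--             dq.pop()
--         dq.append(j)
--         if dq[head] <= j - w:   # at most one index expires per step
--             head += 1
--         if j >= w - 1:
--             read_min_pairs.append((kmers[dq[head]], dq[head]))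
--
--     deltas = [refpos - rpos
--               for mn, rpos in read_min_pairs if mn in index
--               for refpos in index[mn]]
--     delta_counts = {}
--     for delta in deltas:
--         delta_counts[delta] = delta_counts.get(delta, 0) + 1
--     candidates = [d for d, cnt in delta_counts.items() if cnt >= seed_min]
--
--     best_pos, best_mm = -1, max_mismatch + 1
--     for delta in candidates:
--         if delta < 0 or delta + len(read) > len(reference):
--             continue
--         window_seq = reference[delta: delta + len(read)]
--         mismatches = sum(1 for a, b in zip(read, window_seq) if a != b)
--         if mismatches <= max_mismatch and mismatches < best_mm:
--             best_mm = mismatches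
--             best_pos = delta
--     return best_pos, best_mm
-- ===== Notes on version B (the rewrite author's own statement) =====
-- stated objective: alternative
-- what changed: B replaces A's per-window min()+window.index() rescan by a monotonic-queue sliding-window minimum (leftmost minimum kept on ties) and flattens A's nested delta-counting loop into a flat delta list counted in one pass; the candidate filtering and mismatch verification are unchanged.
import Mathlib
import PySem

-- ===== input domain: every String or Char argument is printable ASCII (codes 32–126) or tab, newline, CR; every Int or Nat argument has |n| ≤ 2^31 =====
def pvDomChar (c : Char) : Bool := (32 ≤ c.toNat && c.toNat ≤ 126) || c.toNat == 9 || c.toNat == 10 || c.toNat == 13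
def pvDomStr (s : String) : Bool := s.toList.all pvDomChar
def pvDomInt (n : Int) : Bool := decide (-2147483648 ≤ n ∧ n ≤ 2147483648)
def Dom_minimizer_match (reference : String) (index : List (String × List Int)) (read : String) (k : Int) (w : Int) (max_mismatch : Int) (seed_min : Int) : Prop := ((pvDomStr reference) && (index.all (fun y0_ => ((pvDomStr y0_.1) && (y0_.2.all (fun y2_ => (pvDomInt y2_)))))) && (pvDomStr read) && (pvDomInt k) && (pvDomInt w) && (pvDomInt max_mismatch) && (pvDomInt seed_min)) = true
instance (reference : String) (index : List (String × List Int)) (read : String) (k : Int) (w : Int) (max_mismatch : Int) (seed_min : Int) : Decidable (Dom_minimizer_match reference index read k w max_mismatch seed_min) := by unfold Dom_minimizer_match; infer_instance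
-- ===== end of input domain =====

-- B replaces A's per-window min()+index() rescans by a monotonic-queue sliding-window
-- minimum and flattens the nested delta-counting loop; same return value on w ≥ 1 (Pre_).

-- ===== PORT A =====
-- shared helpers: these lines of Python are textually identical in Source A and Source B
-- (kmer strings are modelled as List Char; dict keys compared via toList — exact,
-- since String equality ↔ toList equality).
def pvKmers (read : String) (k : Int) : List (List Char) :=
  let rl := read.toList
  (PySem.List.pyRange 0 (PySem.List.len rl - k + 1) 1).map
    (fun i => PySem.List.slice rl (some i) (some (i + k)))

def pvIdxd (index : List (String × List Int)) : PySem.Dict (List Char) (List Int) :=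
  PySem.Dict.mk (index.map (fun p => (p.1.toList, p.2)))

def pvCandidates (seed_min : Int) (dc : PySem.Dict Int Int) : List Int :=
  dc.items.foldl (fun acc pr => if seed_min ≤ pr.2 then acc ++ [pr.1] else acc) []

def pvVerify (reference : String) (read : String) (max_mismatch : Int) (cands : List Int) :
    Int × Int :=
  let rl := read.toList
  let refl := reference.toList
  cands.foldl (fun best delta =>
    if delta < 0 ∨ PySem.List.len refl < delta + PySem.List.len rl then best
    else
      let window_seq := PySem.List.slice refl (some delta) (some (delta + PySem.List.len rl))
      let mism : Int := (rl.zip window_seq).foldl (fun s pr => if pr.1 ≠ pr.2 then s + 1 else s) 0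
      if mism ≤ max_mismatch ∧ mism < best.2 then (delta, mism) else best)
    (-1, max_mismatch + 1)

-- the read_min_pairs loop of Source A: per window, min() then .index()
def pvPairsAImpl (kmers : List (List Char)) (w : Int) : List (List Char × Int) :=
  (PySem.List.pyRange 0 (PySem.List.len kmers - w + 1) 1).foldl (fun acc i =>
    let window := PySem.List.slice kmers (some i) (some (i + w))
    match PySem.List.min? window (fun s => s) with
    | none => acc    -- min([]): Python raises ValueError here (only when w ≤ 0); excluded by Pre_
    | some mn => acc ++ [(mn, i + ((PySem.List.index? window mn).getD 0 : Nat))]) []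

-- the delta_counts loop of Source A: nested over pairs, then over index[mn]
def pvCountsA (idxd : PySem.Dict (List Char) (List Int)) (pairs : List (List Char × Int)) :
    PySem.Dict Int Int :=
  pairs.foldl (fun d p =>
    match idxd.get? p.1 with
    | none => d
    | some poss => poss.foldl (fun d2 refpos =>
        d2.insert (refpos - p.2) (d2.getD (refpos - p.2) 0 + 1)) d) PySem.Dict.empty

def minimizer_match (reference : String) (index : List (String × List Int)) (read : String)
    (k : Int) (w : Int) (max_mismatch : Int) (seed_min : Int) : Int × Int :=
  pvVerify reference read max_mismatch
    (pvCandidates seed_min (pvCountsA (pvIdxd index) (pvPairsAImpl (pvKmers read k) w)))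

-- ===== PORT B =====
-- transliteration of Source B's 'while dq and kmers[dq[-1]] > kmers[j]: dq.pop()'
def pvPruneBack (kmers : List (List Char)) (x : List Char) : List Int → List Int
  | [] => []
  | a :: t =>
    match pvPruneBack kmers x t with
    | [] => if x < PySem.List.pyGetD kmers a [] then [] else [a]
    | r => a :: r

-- Source B's 'if dq[head] <= j - w: head += 1' on the live deque dq[head:]
def pvPopExpired (c : Int) : List Int → List Int
  | [] => []
  | f :: rest => if f ≤ c then rest else f :: rest

-- Source B's monotonic-queue loop; the state list is the live deque dq[head:]
-- (advancing head in Python = dropping the first element here)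
def pvStB (kmers : List (List Char)) (w : Int) : List Int × List (List Char × Int) :=
  (PySem.List.pyRange 0 (PySem.List.len kmers) 1).foldl
    (fun (st : List Int × List (List Char × Int)) j =>
      let dq1 := pvPruneBack kmers (PySem.List.pyGetD kmers j []) st.1 ++ [j]
      let dq2 := pvPopExpired (j - w) dq1
      if w - 1 ≤ j then
        match dq2 with
        | [] => (dq2, st.2)   -- dq[head] past the end: Python raises IndexError (only when w ≤ 0); excluded by Pre_
        | f :: _ => (dq2, st.2 ++ [(PySem.List.pyGetD kmers f [], f)])
      else (dq2, st.2)) ([], [])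

-- Source B's flat 'deltas' comprehension
def pvDeltasB (idxd : PySem.Dict (List Char) (List Int)) (pairs : List (List Char × Int)) :
    List Int :=
  pairs.foldl (fun acc p =>
    match idxd.get? p.1 with
    | none => acc
    | some poss => acc ++ poss.map (fun refpos => refpos - p.2)) []

-- Source B's single counting loop over the flat delta list
def pvCountsB (deltas : List Int) : PySem.Dict Int Int :=
  deltas.foldl (fun d delta => d.insert delta (d.getD delta 0 + 1)) PySem.Dict.empty

def minimizer_match_alt (reference : String) (index : List (String × List Int)) (read : String)
    (k : Int) (w : Int) (max_mismatch : Int) (seed_min : Int) : Int × Int :=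
  pvVerify reference read max_mismatch
    (pvCandidates seed_min
      (pvCountsB (pvDeltasB (pvIdxd index) ((pvStB (pvKmers read k) w).2))))

-- ===== PRECONDITION & SPEC =====
-- Pre_ excludes exactly w ≤ 0: there A raises ValueError (min of an empty window) on every input.
def Pre_minimizer_match (reference : String) (index : List (String × List Int)) (read : String)
    (k : Int) (w : Int) (max_mismatch : Int) (seed_min : Int) : Prop := 1 ≤ w
instance (reference : String) (index : List (String × List Int)) (read : String) (k : Int) (w : Int) (max_mismatch : Int) (seed_min : Int) : Decidable (Pre_minimizer_match reference index read k w max_mismatch seed_min) := by unfold Pre_minimizer_match; infer_instance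

def pvWitness_minimizer_match : String × (List (String × List Int)) × String × Int × Int × Int × Int :=
  ("ACGTAC", [("AC", [0, 4])], "ACGT", 2, 1, 2, 1)

def Spec_minimizer_match (reference : String) (index : List (String × List Int)) (read : String) (k : Int) (w : Int) (max_mismatch : Int) (seed_min : Int) (out : Int × Int) : Prop := out = minimizer_match_alt reference index read k w max_mismatch seed_min
instance (reference : String) (index : List (String × List Int)) (read : String) (k : Int) (w : Int) (max_mismatch : Int) (seed_min : Int) (out : Int × Int) : Decidable (Spec_minimizer_match reference index read k w max_mismatch seed_min out) := by unfold Spec_minimizer_match; infer_instance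

-- ===== CLAIM (what is proved, stated in full; the proofs are below) =====
def Claim_equal_minimizer_match : Prop := ∀ (reference : String) (index : List (String × List Int)) (read : String) (k : Int) (w : Int) (max_mismatch : Int) (seed_min : Int), Dom_minimizer_match reference index read k w max_mismatch seed_min → Pre_minimizer_match reference index read k w max_mismatch seed_min → Spec_minimizer_match reference index read k w max_mismatch seed_min (minimizer_match reference index read k w max_mismatch seed_min)

-- ===== LEMMAS AND PROOFS =====

-- value of kmer i (out-of-range reads give [], never reached on live indices)
def pvV (m : List (List Char)) (i : Nat) : List Char := m.getD i []

-- "no strictly smaller kmer strictly after i, up to j"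
def pvQb (m : List (List Char)) (j i : Nat) : Bool :=
  (List.range (j + 1)).all (fun i' => decide (i < i' → ¬ pvV m i' < pvV m i))

-- the live deque contents after step j, as a list of Nat indices
def pvGood (m : List (List Char)) (w : Int) (j : Nat) : List Nat :=
  (List.range (j + 1)).filter (fun i => decide ((j : Int) < (i : Int) + w) && pvQb m j i)

def pvHead (m : List (List Char)) (w : Int) (j : Nat) : Nat := (pvGood m w j).headD 0

def pvPair (m : List (List Char)) (w : Int) (j : Nat) : List Char × Int :=
  (pvV m (pvHead m w j), (pvHead m w j : Int))

def pvPairs (m : List (List Char)) (w : Int) (t : Nat) : List (List Char × Int) :=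
  ((List.range t).filter (fun j : Nat => decide (w - 1 ≤ (j : Int)))).map (pvPair m w)

def pvDqL (m : List (List Char)) (w : Int) : Nat → List Int
  | 0 => []
  | j + 1 => (pvGood m w j).map (fun i : Nat => (i : Int))

-- leftmost minimum of m over [lo, hi)
def pvIsLMin (m : List (List Char)) (lo hi p : Nat) : Prop :=
  lo ≤ p ∧ p < hi ∧ (∀ q, lo ≤ q → q < hi → pvV m p ≤ pvV m q) ∧
    (∀ q, lo ≤ q → q < p → pvV m q ≠ pvV m p)

lemma pvIsLMin_unique {m : List (List Char)} {lo hi p p' : Nat}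
    (h : pvIsLMin m lo hi p) (h' : pvIsLMin m lo hi p') : p = p' := by
  obtain ⟨hl, hh, hmin, hleft⟩ := h
  obtain ⟨hl', hh', hmin', hleft'⟩ := h'
  rcases Nat.lt_trichotomy p p' with hc | hc | hc
  · exact absurd (le_antisymm (hmin p' hl' hh') (hmin' p hl hh)) (hleft' p hl hc)
  · exact hc
  · exact absurd (le_antisymm (hmin' p hl hh) (hmin p' hl' hh')) ((hleft p' hl' hc).symm ∘ Eq.symm)

lemma pvQb_iff {m : List (List Char)} {j i : Nat} :
    pvQb m j i = true ↔ ∀ i', i < i' → i' ≤ j → ¬ pvV m i' < pvV m i := by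
  unfold pvQb
  rw [List.all_eq_true]
  constructor
  · intro h i' h1 h2
    have hthis := h i' (by simpa [List.mem_range, Nat.lt_succ_iff] using h2)
    simp only [decide_eq_true_eq] at hthis
    exact hthis h1
  · intro h i' hm
    simp only [decide_eq_true_eq]
    intro h1
    exact h i' h1 (by simpa [List.mem_range, Nat.lt_succ_iff] using hm)

lemma pvPruneBack_eq_filter {m : List (List Char)} {x : List Char} :
    ∀ (l : List Int), l.Pairwise (fun a b => ¬ PySem.List.pyGetD m b [] < PySem.List.pyGetD m a []) →
      pvPruneBack m x l = l.filter (fun a => !decide (x < PySem.List.pyGetD m a [])) := by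
  intro l hl
  induction l with
  | nil => rfl
  | cons a t ih =>
    rw [List.pairwise_cons] at hl
    rw [pvPruneBack, ih hl.2, List.filter_cons]
    rcases hft : t.filter (fun a => !decide (x < PySem.List.pyGetD m a [])) with _ | ⟨b, r⟩
    · by_cases hxa : x < PySem.List.pyGetD m a []
      · simp [hxa]
      · simp [hxa]
    · have hbmem : b ∈ t.filter (fun a => !decide (x < PySem.List.pyGetD m a [])) := by
        rw [hft]; exact List.mem_cons_self
      rw [List.mem_filter] at hbmem
      have hab : ¬ PySem.List.pyGetD m b [] < PySem.List.pyGetD m a [] := hl.1 b hbmem.1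
      have hxb : ¬ x < PySem.List.pyGetD m b [] := by simpa using hbmem.2
      have hxa : ¬ x < PySem.List.pyGetD m a [] := fun hc =>
        hxb (lt_of_lt_of_le hc (le_of_not_gt hab))
      simp [hxa]

-- one conditional front-pop removes exactly the expired indices, provided the
-- previous window bound (c ≤ every element) already holds
lemma pvPopFront_eq_filter (c : Int) (l : List Int) (hl : l.Pairwise (· < ·))
    (hall : ∀ x ∈ l, c ≤ x) :
    pvPopExpired c l = l.filter (fun i => !decide (i ≤ c)) := by
  cases l with
  | nil => rfl
  | cons f rest =>
    rw [pvPopExpired.eq_def]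
    rw [List.pairwise_cons] at hl
    have hrest : rest.filter (fun i => !decide (i ≤ c)) = rest := by
      rw [List.filter_eq_self]
      intro b hb
      have hcb : c < b := lt_of_le_of_lt (hall f List.mem_cons_self) (hl.1 b hb)
      simpa using not_le_of_gt hcb
    by_cases h : f ≤ c
    · simp only [h, if_true, List.filter_cons, decide_true, Bool.not_true, Bool.false_eq_true,
        if_false, hrest]
    · simp only [h, if_false, List.filter_cons, decide_false, Bool.not_false, if_true, hrest]

lemma pvGood_pairwise_lt (m : List (List Char)) (w : Int) (j : Nat) :
    (pvGood m w j).Pairwise (· < ·) := by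
  exact List.Pairwise.sublist List.filter_sublist List.pairwise_lt_range

lemma pvGood_mem (m : List (List Char)) (w : Int) (j i : Nat) :
    i ∈ pvGood m w j ↔
      i ≤ j ∧ (j : Int) < (i : Int) + w ∧ ∀ i', i < i' → i' ≤ j → ¬ pvV m i' < pvV m i := by
  unfold pvGood
  rw [List.mem_filter, List.mem_range, Nat.lt_succ_iff, Bool.and_eq_true, pvQb_iff,
    decide_eq_true_eq]

-- values along the deque are non-decreasing
lemma pvGood_cast_pairwise (m : List (List Char)) (w : Int) (j : Nat) :
    ((pvGood m w j).map (fun i : Nat => (i : Int))).Pairwise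
      (fun a b => ¬ PySem.List.pyGetD m b [] < PySem.List.pyGetD m a []) := by
  rw [List.pairwise_map]
  refine List.Pairwise.imp_of_mem ?_ (pvGood_pairwise_lt m w j)
  intro a b ha hb hlt
  rw [pvGood_mem] at ha hb
  have hv := ha.2.2 b hlt hb.1
  simpa [pvV, PySem.List.pyGetD_natCast] using hv

lemma pvQb_self (m : List (List Char)) (j : Nat) : pvQb m j j = true := by
  rw [pvQb_iff]
  intro i' h1 h2
  exact absurd (lt_of_lt_of_le h1 h2) (lt_irrefl j)

lemma pvQb_succ (m : List (List Char)) (jp i : Nat) (hij : i ≤ jp) :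
    pvQb m (jp + 1) i = (pvQb m jp i && !decide (pvV m (jp + 1) < pvV m i)) := by
  rw [Bool.eq_iff_iff, Bool.and_eq_true, pvQb_iff, pvQb_iff, Bool.not_eq_true',
    decide_eq_false_iff_not]
  constructor
  · intro h
    exact ⟨fun i' h1 h2 => h i' h1 (by omega), h (jp + 1) (by omega) (le_refl _)⟩
  · rintro ⟨h1, h2⟩ i' hlt hle
    by_cases hc : i' ≤ jp
    · exact h1 i' hlt hc
    · have : i' = jp + 1 := by omega
      subst this
      exact h2

-- prune, append and expire turn the deque for step j-1 into the deque for step j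
lemma pvGood_step (m : List (List Char)) (w : Int) (hw : 1 ≤ w) (j : Nat) :
    pvPopExpired ((j : Int) - w) ((pvPruneBack m (pvV m j) (pvDqL m w j)) ++ [(j : Int)])
      = (pvGood m w j).map (fun i : Nat => (i : Int)) := by
  -- stage 1: prune + append, with the stale (step j-1) window bound
  have key : (pvPruneBack m (pvV m j) (pvDqL m w j)) ++ [(j : Int)]
      = ((List.range (j + 1)).filter
          (fun i : Nat => decide ((j : Int) - 1 < (i : Int) + w) && pvQb m j i)).map
          (fun i : Nat => (i : Int)) := by
    cases j with
    | zero =>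
      have hcond : (decide (((0 : Nat) : Int) - 1 < ((0 : Nat) : Int) + w) && pvQb m 0 0)
          = true := by
        rw [pvQb_self, Bool.and_true, decide_eq_true_eq]
        omega
      simp only [Nat.zero_add, List.range_one, List.filter_cons, List.filter_nil, hcond, if_true]
      rfl
    | succ jp =>
      have hprune : pvPruneBack m (pvV m (jp + 1)) (pvDqL m w (jp + 1))
          = ((pvGood m w jp).filter
              (fun i => !decide (pvV m (jp + 1) < pvV m i))).map (fun i : Nat => (i : Int)) := by
        show pvPruneBack m (pvV m (jp + 1)) ((pvGood m w jp).map (fun i : Nat => (i : Int))) = _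
        rw [pvPruneBack_eq_filter _ (pvGood_cast_pairwise m w jp), List.filter_map]
        congr 1
        apply List.filter_congr
        intro i _
        simp [Function.comp, pvV, PySem.List.pyGetD_natCast]
      rw [hprune]
      have happ : ((pvGood m w jp).filter
            (fun i => !decide (pvV m (jp + 1) < pvV m i))).map (fun i : Nat => (i : Int))
            ++ [((jp + 1 : Nat) : Int)]
          = (((pvGood m w jp).filter (fun i => !decide (pvV m (jp + 1) < pvV m i)))
              ++ [jp + 1]).map (fun i : Nat => (i : Int)) := by
        rw [List.map_append]
        rfl
      rw [happ]
      congr 1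
      unfold pvGood
      rw [List.filter_filter, List.range_succ (n := jp + 1), List.filter_append]
      congr 1
      · apply List.filter_congr
        intro i hi
        rw [List.mem_range] at hi
        rw [pvQb_succ m jp i (by omega)]
        have hwin : decide (((jp + 1 : Nat) : Int) - 1 < (i : Int) + w)
            = decide (((jp : Nat) : Int) < (i : Int) + w) := by
          apply decide_eq_decide.mpr
          push_cast
          omega
        rw [hwin]
        cases hq : pvQb m jp i <;> cases hv : decide (pvV m (jp + 1) < pvV m i) <;>
          cases hw2 : decide (((jp : Nat) : Int) < (i : Int) + w) <;> simp
      · have h1 : (decide (((jp + 1 : Nat) : Int) - 1 < ((jp + 1 : Nat) : Int) + w)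
            && pvQb m (jp + 1) (jp + 1)) = true := by
          rw [pvQb_self, Bool.and_true, decide_eq_true_eq]
          omega
        simp only [List.filter_cons, List.filter_nil, h1, if_true]
  rw [key]
  have hpw : (((List.range (j + 1)).filter
      (fun i : Nat => decide ((j : Int) - 1 < (i : Int) + w) && pvQb m j i)).map
        (fun i : Nat => (i : Int))).Pairwise (· < ·) := by
    rw [List.pairwise_map]
    refine List.Pairwise.imp ?_ (List.Pairwise.sublist List.filter_sublist List.pairwise_lt_range)
    intro a b hab
    exact_mod_cast hab
  have hall : ∀ x ∈ ((List.range (j + 1)).filter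
      (fun i : Nat => decide ((j : Int) - 1 < (i : Int) + w) && pvQb m j i)).map
        (fun i : Nat => (i : Int)), (j : Int) - w ≤ x := by
    intro x hx
    rw [List.mem_map] at hx
    obtain ⟨i, hi, rfl⟩ := hx
    rw [List.mem_filter, Bool.and_eq_true, decide_eq_true_eq] at hi
    omega
  rw [pvPopFront_eq_filter ((j : Int) - w) _ hpw hall, List.filter_map]
  congr 1
  unfold pvGood
  rw [List.filter_filter]
  apply List.filter_congr
  intro i _
  by_cases hwin : (j : Int) < (i : Int) + w
  · have h1 : (!decide ((i : Int) ≤ (j : Int) - w)) = true := by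
      rw [Bool.not_eq_true', decide_eq_false_iff_not]
      omega
    have h2 : decide ((j : Int) - 1 < (i : Int) + w) = true := by
      rw [decide_eq_true_eq]
      omega
    have h3 : decide ((j : Int) < (i : Int) + w) = true := decide_eq_true hwin
    simp [Function.comp, h1, h3]
    intro _
    omega
  · have h1 : (!decide ((i : Int) ≤ (j : Int) - w)) = false := by
      rw [Bool.not_eq_false', decide_eq_true_eq]
      omega
    have h3 : decide ((j : Int) < (i : Int) + w) = false := by
      rw [decide_eq_false_iff_not]
      exact hwin
    simp [Function.comp, h1, h3]

lemma pvSelf_mem_good (m : List (List Char)) (w : Int) (hw : 1 ≤ w) (j : Nat) :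
    j ∈ pvGood m w j := by
  rw [pvGood_mem]
  exact ⟨le_refl j, by omega, fun i' h1 h2 => absurd (lt_of_lt_of_le h1 h2) (lt_irrefl j)⟩

lemma pvHead_isLMin (m : List (List Char)) (w : Int) (hw : 1 ≤ w) (j : Nat)
    (hj : w - 1 ≤ (j : Int)) :
    pvIsLMin m (j + 1 - w.toNat) (j + 1) (pvHead m w j) := by
  set lo := j + 1 - w.toNat with hlo
  have hwin_iff : ∀ i : Nat, ((j : Int) < (i : Int) + w ↔ lo ≤ i) := by
    intro i
    rw [hlo]
    omega
  have hne : (Finset.Ico lo (j + 1)).Nonempty := ⟨j, by rw [Finset.mem_Ico]; omega⟩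
  obtain ⟨q0, hq0mem, hq0min⟩ := Finset.exists_min_image (Finset.Ico lo (j + 1)) (pvV m) hne
  obtain ⟨p, hpmem, hpmin⟩ := Finset.exists_min_image
    ((Finset.Ico lo (j + 1)).filter (fun q => pvV m q = pvV m q0)) (fun x => x)
    ⟨q0, by rw [Finset.mem_filter]; exact ⟨hq0mem, rfl⟩⟩
  rw [Finset.mem_filter] at hpmem
  obtain ⟨hpIco, hpval⟩ := hpmem
  rw [Finset.mem_Ico] at hpIco hq0mem
  have hmin : ∀ q, lo ≤ q → q < j + 1 → pvV m p ≤ pvV m q := by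
    intro q h1 h2
    rw [hpval]
    exact hq0min q (Finset.mem_Ico.mpr ⟨h1, h2⟩)
  have hleft : ∀ q, lo ≤ q → q < p → pvV m q ≠ pvV m p := by
    intro q h1 h2 heq
    have hq2 : q ∈ (Finset.Ico lo (j + 1)).filter (fun q => pvV m q = pvV m q0) := by
      rw [Finset.mem_filter, Finset.mem_Ico]
      exact ⟨⟨h1, by omega⟩, by rw [← hpval]; exact heq⟩
    exact absurd (hpmin q hq2) (by omega)
  have hpl : pvIsLMin m lo (j + 1) p := ⟨hpIco.1, hpIco.2, hmin, hleft⟩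
  have hpgood : p ∈ pvGood m w j := by
    rw [pvGood_mem]
    refine ⟨by omega, (hwin_iff p).mpr hpIco.1, ?_⟩
    intro i' h1 h2 hv
    exact absurd hv (not_lt_of_ge (hmin i' (by omega) (by omega)))
  have hpe : ∀ g ∈ pvGood m w j, p ≤ g := by
    intro g hgm
    by_contra hc
    rw [pvGood_mem] at hgm
    obtain ⟨hg1, hg2, hg3⟩ := hgm
    have hlog : lo ≤ g := (hwin_iff g).mp hg2
    have h1 : ¬ pvV m p < pvV m g := hg3 p (by omega) (by omega)
    have h2 : pvV m p ≤ pvV m g := hmin g hlog (by omega)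
    exact hleft g hlog (by omega) (le_antisymm (le_of_not_gt h1) h2)
  obtain ⟨g0, gs, hg⟩ : ∃ g0 gs, pvGood m w j = g0 :: gs := by
    cases hgg : pvGood m w j with
    | nil =>
      have hmem := pvSelf_mem_good m w hw j
      rw [hgg] at hmem
      exact absurd hmem List.not_mem_nil
    | cons a l => exact ⟨a, l, rfl⟩
  have hpg0 : p = g0 := by
    have h1 : p ≤ g0 := hpe g0 (by rw [hg]; exact List.mem_cons_self)
    have hpm := hpgood
    rw [hg] at hpm
    rcases List.mem_cons.mp hpm with h | h
    · exact h
    · have hpw2 := pvGood_pairwise_lt m w j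
      rw [hg, List.pairwise_cons] at hpw2
      have h2 := hpw2.1 p h
      omega
  have hhead : pvHead m w j = g0 := by unfold pvHead; rw [hg]; rfl
  rw [hhead, ← hpg0]
  exact hpl

lemma pvFoldB (m : List (List Char)) (w : Int) (hw : 1 ≤ w) (t : Nat) :
    ((List.range t).foldl
      (fun (st : List Int × List (List Char × Int)) (jN : Nat) =>
        let dq1 := pvPruneBack m (PySem.List.pyGetD m (jN : Int) []) st.1 ++ [(jN : Int)]
        let dq2 := pvPopExpired ((jN : Int) - w) dq1
        if w - 1 ≤ (jN : Int) then
          match dq2 with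
          | [] => (dq2, st.2)
          | f :: _ => (dq2, st.2 ++ [(PySem.List.pyGetD m f [], f)])
        else (dq2, st.2)) ([], []))
      = (pvDqL m w t, pvPairs m w t) := by
  induction t with
  | zero => rfl
  | succ t ih =>
    rw [List.range_succ, List.foldl_append, ih, List.foldl_cons, List.foldl_nil]
    dsimp only
    rw [show PySem.List.pyGetD m ((t : Nat) : Int) [] = pvV m t from by
      simp [pvV, PySem.List.pyGetD_natCast]]
    rw [pvGood_step m w hw t]
    obtain ⟨g, gs, hg⟩ : ∃ g gs, pvGood m w t = g :: gs := by
      cases hgg : pvGood m w t with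
      | nil =>
        have hmem := pvSelf_mem_good m w hw t
        rw [hgg] at hmem
        exact absurd hmem List.not_mem_nil
      | cons a l => exact ⟨a, l, rfl⟩
    have hdq : (pvGood m w t).map (fun i : Nat => (i : Int)) = pvDqL m w (t + 1) := rfl
    have hhead : pvHead m w t = g := by unfold pvHead; rw [hg]; rfl
    by_cases hcw : w - 1 ≤ ((t : Nat) : Int)
    · rw [if_pos hcw, hg, List.map_cons]
      dsimp only
      have hp : pvPairs m w (t + 1) = pvPairs m w t ++ [pvPair m w t] := by
        unfold pvPairs
        rw [List.range_succ, List.filter_append, List.map_append]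
        congr 1
        have hc : decide (w - 1 ≤ ((t : Nat) : Int)) = true := decide_eq_true hcw
        simp only [List.filter_cons, List.filter_nil, hc, if_true, List.map_cons, List.map_nil]
      rw [hp]
      have hpair : pvPair m w t = (PySem.List.pyGetD m ((g : Nat) : Int) [], ((g : Nat) : Int)) := by
        unfold pvPair
        rw [hhead]
        simp [pvV, PySem.List.pyGetD_natCast]
      rw [hpair, ← hdq, hg, List.map_cons]
    · rw [if_neg hcw]
      have hp : pvPairs m w (t + 1) = pvPairs m w t := by
        unfold pvPairs
        rw [List.range_succ, List.filter_append]
        have hc : decide (w - 1 ≤ ((t : Nat) : Int)) = false := by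
          rw [decide_eq_false_iff_not]
          exact hcw
        simp only [List.filter_cons, List.filter_nil, hc, Bool.false_eq_true, if_false,
          List.append_nil]
      rw [hp, ← hdq, hg, List.map_cons]

lemma pvStB_eq (m : List (List Char)) (w : Int) (hw : 1 ≤ w) :
    (pvStB m w).2 = pvPairs m w m.length := by
  unfold pvStB
  rw [show (PySem.List.pyRange 0 (PySem.List.len m) 1) =
      (List.range m.length).map (fun i : Nat => (i : Int)) by
    rw [PySem.List.len_eq]; exact PySem.List.pyRange_zero_natCast _]
  rw [List.foldl_map, pvFoldB m w hw m.length]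

lemma pvFilterRangeShift (n thr : Nat) :
    (List.range n).filter (fun j => decide (thr ≤ j))
      = (List.range (n - thr)).map (fun i => i + thr) := by
  induction n with
  | zero => simp
  | succ n ih =>
    rw [List.range_succ, List.filter_append, ih]
    by_cases h : thr ≤ n
    · have hc : decide (thr ≤ n) = true := decide_eq_true h
      rw [show n + 1 - thr = (n - thr) + 1 from by omega, List.range_succ, List.map_append]
      simp only [List.filter_cons, List.filter_nil, hc, if_true, List.map_cons, List.map_nil]
      congr 3
      omega
    · have hc : decide (thr ≤ n) = false := by
        rw [decide_eq_false_iff_not]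
        exact h
      rw [show n + 1 - thr = 0 from by omega, show n - thr = 0 from by omega]
      simp only [List.filter_cons, List.filter_nil, hc, Bool.false_eq_true, if_false,
        List.append_nil]

lemma pvPairsA_eq (m : List (List Char)) (w : Int) (hw : 1 ≤ w) :
    pvPairsAImpl m w = pvPairs m w m.length := by
  unfold pvPairsAImpl pvPairs
  have hrange : PySem.List.pyRange 0 (PySem.List.len m - w + 1) 1
      = (List.range (m.length + 1 - w.toNat)).map (fun i : Nat => (i : Int)) := by
    rw [PySem.List.len_eq]
    by_cases hc : w ≤ (m.length : Int) + 1
    · rw [show ((m.length : Int) - w + 1) = ((m.length + 1 - w.toNat : Nat) : Int) from by omega]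
      exact PySem.List.pyRange_zero_natCast _
    · rw [show m.length + 1 - w.toNat = 0 from by omega]
      rw [PySem.List.pyRange_of_pos 0 ((m.length : Int) - w + 1) (by norm_num)]
      have hne : ¬ ((0 : Int) < (m.length : Int) - w + 1) := by omega
      simp [hne]
  rw [hrange, List.foldl_map]
  refine Eq.trans (PySem.List.foldl_congr_mem _ _
    (fun acc iN => acc ++ [pvPair m w (iN + (w.toNat - 1))]) _ ?_) ?_
  · intro acc iN hiN
    rw [List.mem_range] at hiN
    have hbound : iN + w.toNat ≤ m.length := by omega
    dsimp only
    have hslice : PySem.List.slice m (some ((iN : Nat) : Int)) (some (((iN : Nat) : Int) + w))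
        = (m.drop iN).take w.toNat := by
      rw [show (((iN : Nat) : Int) + w) = ((iN + w.toNat : Nat) : Int) from by push_cast; omega,
        PySem.List.slice_natCast]
      congr 1
      omega
    rw [hslice]
    have hWlen : ((m.drop iN).take w.toNat).length = w.toNat := by
      simp [List.length_take, List.length_drop]
      omega
    have hWne : (m.drop iN).take w.toNat ≠ [] := by
      intro h
      rw [h] at hWlen
      simp at hWlen
      omega
    have hWget : ∀ (q : Nat) (hq : q < ((m.drop iN).take w.toNat).length),
        ((m.drop iN).take w.toNat)[q] = pvV m (iN + q) := by
      intro q hq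
      rw [List.getElem_take, List.getElem_drop]
      have hlt : iN + q < m.length := by
        rw [hWlen] at hq
        omega
      rw [pvV, List.getD_eq_getElem]
    cases hmn : PySem.List.min? ((m.drop iN).take w.toNat) (fun s => s) with
    | none => exact absurd ((PySem.List.min?_eq_none_iff _ _).mp hmn) hWne
    | some mn =>
      have hinsteq : (fun (a b : List Char) => a.decidableLT b)
          = (LinearOrder.toDecidableLT (α := List Char)) := by
        funext a b
        exact Subsingleton.elim _ _
      have hmn2 : @PySem.List.min? (List Char) (List Char) List.instLinearOrder.toLT
          LinearOrder.toDecidableLT ((m.drop iN).take w.toNat) (fun s => s) = some mn := by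
        rw [← hinsteq]
        exact hmn
      have hmem : mn ∈ (m.drop iN).take w.toNat := PySem.List.min?_mem hmn
      have hmin : ∀ y ∈ (m.drop iN).take w.toNat, mn ≤ y := PySem.List.min?_isMin hmn2
      obtain ⟨r, hr⟩ := Option.isSome_iff_exists.mp
        ((PySem.List.index?_isSome_iff _ _).mpr hmem)
      obtain ⟨hrlt, hWr, hbefore⟩ := PySem.List.getElem_of_index?_eq_some hr
      have hvr : pvV m (iN + r) = mn := by
        rw [← hWget r hrlt]
        exact hWr
      have hlm : pvIsLMin m iN (iN + w.toNat) (iN + r) := by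
        refine ⟨by omega, by rw [hWlen] at hrlt; omega, ?_, ?_⟩
        · intro q h1 h2
          have hq' : q - iN < ((m.drop iN).take w.toNat).length := by
            rw [hWlen]
            omega
          have hle := hmin _ (List.getElem_mem hq')
          rw [hWget (q - iN) hq', show iN + (q - iN) = q from by omega] at hle
          rw [hvr]
          exact hle
        · intro q h1 h2 heq
          have hq' : q - iN < r := by omega
          apply hbefore (q - iN) hq'
          rw [hWget (q - iN) (by rw [hWlen]; rw [hWlen] at hrlt; omega),
            show iN + (q - iN) = q from by omega, heq, hvr]
      have hj : w - 1 ≤ ((iN + (w.toNat - 1) : Nat) : Int) := by push_cast; omega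
      have hB := pvHead_isLMin m w hw (iN + (w.toNat - 1)) hj
      rw [show iN + (w.toNat - 1) + 1 - w.toNat = iN from by omega,
        show iN + (w.toNat - 1) + 1 = iN + w.toNat from by omega] at hB
      have hpeq : pvHead m w (iN + (w.toNat - 1)) = iN + r := pvIsLMin_unique hB hlm
      dsimp only
      rw [hr]
      unfold pvPair
      rw [hpeq, hvr]
      simp only [Option.getD_some, Nat.cast_add]
  · rw [PySem.List.foldl_append_singleton_eq_map]
    have hfilt : (List.range m.length).filter (fun j : Nat => decide (w - 1 ≤ (j : Int)))
        = (List.range (m.length + 1 - w.toNat)).map (fun i => i + (w.toNat - 1)) := by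
      rw [List.filter_congr (q := fun j : Nat => decide (w.toNat - 1 ≤ j)) ?_]
      · rw [pvFilterRangeShift m.length (w.toNat - 1)]
        congr 2
        omega
      · intro j _
        apply decide_eq_decide.mpr
        omega
    rw [hfilt, List.map_map]
    simp [Function.comp]

lemma pvCounts_eq (idxd : PySem.Dict (List Char) (List Int)) (P : List (List Char × Int)) :
    pvCountsA idxd P = pvCountsB (pvDeltasB idxd P) := by
  unfold pvCountsA pvCountsB pvDeltasB
  have hflat : P.foldl (fun acc p => match idxd.get? p.1 with
      | none => acc
      | some poss => acc ++ poss.map (fun refpos => refpos - p.2)) ([] : List Int)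
      = P.flatMap (fun p => match idxd.get? p.1 with
        | none => []
        | some poss => poss.map (fun refpos => refpos - p.2)) := by
    have hcg := PySem.List.foldl_congr_mem P
      (fun acc p => match idxd.get? p.1 with
        | none => acc
        | some poss => acc ++ poss.map (fun refpos => refpos - p.2))
      (fun acc p => acc ++ (match idxd.get? p.1 with
        | none => []
        | some poss => poss.map (fun refpos => refpos - p.2)))
      ([] : List Int) ?_
    · rw [hcg, PySem.List.foldl_append_eq_flatMap]
      simp
    · intro acc p _
      cases h : idxd.get? p.1 <;> simp [h]
  rw [hflat, List.foldl_flatMap]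
  apply PySem.List.foldl_congr_mem
  intro d p _
  cases h : idxd.get? p.1 with
  | none => simp
  | some poss => simp [List.foldl_map]

-- ===== VERDICT (by name: the statement is the Claim_ definition above) =====
theorem minimizer_match_spec : Claim_equal_minimizer_match := by
  intro reference index read k w max_mismatch seed_min _hdom hw
  have hw' : (1 : Int) ≤ w := hw
  unfold Spec_minimizer_match minimizer_match minimizer_match_alt
  rw [pvCounts_eq, pvPairsA_eq _ _ hw', pvStB_eq _ _ hw']
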